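-- pv_equiv track=rewrite | github.com/BenWolfaardt/slip-39-passphrase-brute-force | slip39_and_bip39_hybrid_bruteforce.py | count_total_combinations
-- ===== SOURCE A (Python) =====
-- import itertools
-- from typing import List, Iterator
--
-- def count_total_combinations(components: List[str]) -> int:
--     """Count total combinations without generating them all (memory efficient)."""
--     total = 1  # Empty passphrase
--
--     for length in range(1, len(components) + 1):
--         # combinations(n, r) * permutations(r)
--         n_combinations = len(list(itertools.combinations(components, length)))
--         n_permutations_per_combo = 1
--         for i in range(1, length + 1):
--             n_permutations_per_combo *= i  # factorial(length)
--
--         total += n_combinations * n_permutations_per_combo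
--
--     return total
-- ===== SOURCE B (Python) =====
-- def count_total_combinations(components):
--     """Count total combinations without generating them all (memory efficient)."""
--     # S(n) = sum_{k=0..n} n!/(n-k)!  satisfies S(n) = n*S(n-1) + 1, S(0) = 1.
--     total = 1
--     for i in range(1, len(components) + 1):
--         total = total * i + 1
--     return total
-- ===== Notes on version B (the rewrite author's own statement) =====
-- stated objective: faster
-- what changed: Replaces materializing all k-combinations plus an inner factorial loop with the single-pass recurrence S(n)=n*S(n-1)+1 for the sum of falling factorials.
import Mathlib
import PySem

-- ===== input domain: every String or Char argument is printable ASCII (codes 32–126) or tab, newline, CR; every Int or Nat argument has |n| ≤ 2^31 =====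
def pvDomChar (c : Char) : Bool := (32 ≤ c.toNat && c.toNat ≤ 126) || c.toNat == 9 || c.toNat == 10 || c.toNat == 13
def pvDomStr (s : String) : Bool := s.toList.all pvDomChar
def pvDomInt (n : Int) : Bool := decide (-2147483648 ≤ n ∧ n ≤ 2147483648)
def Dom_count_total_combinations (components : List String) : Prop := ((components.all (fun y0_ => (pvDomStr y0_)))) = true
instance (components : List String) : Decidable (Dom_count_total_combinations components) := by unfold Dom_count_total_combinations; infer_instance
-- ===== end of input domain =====

-- B replaces A's materialized combination lists and inner factorial loop with the
-- one-pass recurrence S(n) = n*S(n-1) + 1 (objective: faster, asymptotically).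

-- ===== PORT A =====
-- itertools.combinations(components, length) is ported as List.sublistsLen (only its
-- length is used); the inner 'for i in range(1, length+1)' factorial loop is a foldl.
def count_total_combinations (components : List String) : Int :=
  (PySem.List.pyRange 1 ((components.length : Int) + 1) 1).foldl
    (fun total length =>
      let n_combinations : Int := ((List.sublistsLen length.toNat components).length : Int)
      let n_permutations_per_combo : Int :=
        (PySem.List.pyRange 1 (length + 1) 1).foldl (fun p i => p * i) 1
      total + n_combinations * n_permutations_per_combo)
    1

-- ===== PORT B =====
def count_total_combinations_alt (components : List String) : Int :=
  (PySem.List.pyRange 1 ((components.length : Int) + 1) 1).foldl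
    (fun total i => total * i + 1) 1

-- ===== PRECONDITION & SPEC =====
def Spec_count_total_combinations (components : List String) (out : Int) : Prop := out = count_total_combinations_alt components
instance (components : List String) (out : Int) : Decidable (Spec_count_total_combinations components out) := by unfold Spec_count_total_combinations; infer_instance

-- ===== CLAIM (what is proved, stated in full; the proofs are below) =====
def Claim_equal_count_total_combinations : Prop := ∀ (components : List String), Dom_count_total_combinations components → Spec_count_total_combinations components (count_total_combinations components)

-- ===== LEMMAS AND PROOFS =====

-- T n = Σ_{k=0..n} n!/(n-k)!  (the mathematical value both programs compute)
def TNat (n : Nat) : Nat := ∑ k ∈ Finset.range (n + 1), n.descFactorial k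

-- B's recurrence, in Nat
def bNat : Nat → Nat
  | 0 => 1
  | n + 1 => bNat n * (n + 1) + 1

-- A's inner loop is factorial
theorem fact_fold (k : Nat) :
    (PySem.List.pyRange 1 ((k : Int) + 1) 1).foldl (fun p i => p * i) 1
      = (Nat.factorial k : Int) := by
  induction k with
  | zero => simp [PySem.List.pyRange_one_eq_nil, Nat.factorial]
  | succ k ih =>
      have h : PySem.List.pyRange 1 (((k + 1 : Nat) : Int) + 1) 1
          = PySem.List.pyRange 1 ((k : Int) + 1) 1 ++ [(k : Int) + 1] := by
        have h2 : (((k + 1 : Nat) : Int) + 1) = ((k : Int) + 1) + 1 := by push_cast; ring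
        rw [h2, PySem.List.pyRange_one_succ_right (a := 1) (b := (k : Int) + 1) (by omega)]
      rw [h, List.foldl_append, ih]
      simp [Nat.factorial_succ]
      ring

-- B's fold computes bNat
theorem b_fold (k : Nat) :
    (PySem.List.pyRange 1 ((k : Int) + 1) 1).foldl (fun t i => t * i + 1) 1
      = (bNat k : Int) := by
  induction k with
  | zero => simp [PySem.List.pyRange_one_eq_nil, bNat]
  | succ k ih =>
      have h : PySem.List.pyRange 1 (((k + 1 : Nat) : Int) + 1) 1
          = PySem.List.pyRange 1 ((k : Int) + 1) 1 ++ [(k : Int) + 1] := by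
        have h2 : (((k + 1 : Nat) : Int) + 1) = ((k : Int) + 1) + 1 := by push_cast; ring
        rw [h2, PySem.List.pyRange_one_succ_right (a := 1) (b := (k : Int) + 1) (by omega)]
      rw [h, List.foldl_append, ih]
      simp [bNat]

theorem TNat_succ (n : Nat) : TNat (n + 1) = (n + 1) * TNat n + 1 := by
  unfold TNat
  rw [Finset.sum_range_succ', Finset.mul_sum]
  simp only [Nat.succ_descFactorial_succ, Nat.descFactorial_zero]

theorem bNat_eq_TNat (n : Nat) : bNat n = TNat n := by
  induction n with
  | zero => simp [bNat, TNat]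
  | succ n ih => rw [bNat, TNat_succ, ih, Nat.mul_comm]

-- A's fold computes TNat
theorem a_fold (components : List String) :
    count_total_combinations components = (TNat components.length : Int) := by
  unfold count_total_combinations
  set n := components.length with hn
  rw [PySem.List.foldl_add
        (PySem.List.pyRange 1 ((n : Int) + 1) 1)
        (fun length => ((List.sublistsLen length.toNat components).length : Int)
          * (PySem.List.pyRange 1 (length + 1) 1).foldl (fun p i => p * i) 1) 1]
  rw [PySem.List.pyRange_one, List.map_map]
  have hlen : ((n : Int) + 1 - 1).toNat = n := by omega
  rw [hlen]
  have hmap :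
      ((fun length => ((List.sublistsLen length.toNat components).length : Int)
          * (PySem.List.pyRange 1 (length + 1) 1).foldl (fun p i => p * i) 1)
        ∘ fun k : Nat => (1 : Int) + (k : Int))
      = fun j : Nat => (n.descFactorial (j + 1) : Int) := by
    funext j
    simp only [Function.comp]
    have h1 : ((1 : Int) + (j : Int)).toNat = j + 1 := by omega
    have h2 : ((1 : Int) + (j : Int)) + 1 = (((j + 1 : Nat) : Int)) + 1 := by push_cast; ring
    rw [h1, h2, fact_fold, List.length_sublistsLen, ← hn,
        Nat.descFactorial_eq_factorial_mul_choose]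
    push_cast
    ring
  rw [hmap]
  have hsum : (List.map (fun j : Nat => (n.descFactorial (j + 1) : Int)) (List.range n)).sum
      = ∑ k ∈ Finset.range n, (n.descFactorial (k + 1) : Int) := by rfl
  have ht : ((TNat n : Nat) : Int) = 1 + ∑ k ∈ Finset.range n, (n.descFactorial (k + 1) : Int) := by
    unfold TNat
    rw [Finset.sum_range_succ', Nat.descFactorial_zero]
    push_cast
    ring
  rw [hsum, ht]

-- ===== VERDICT (by name: the statement is the Claim_ definition above) =====
theorem count_total_combinations_spec : Claim_equal_count_total_combinations := by
  intro components _
  unfold Spec_count_total_combinations count_total_combinations_alt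
  rw [a_fold, b_fold components.length, bNat_eq_TNat]
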